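-- pv_equiv track=rewrite | github.com/danep93/ceelo_sim | main.py | get_probable_best_ones_targets
-- ===== SOURCE A (Python) =====
-- def get_counts(dice):
--     counts = {}
--     for d in dice:
--         counts[d] = counts.get(d,0) + 1
--     return counts;
--
-- def get_probable_best_ones_targets(dice):
--     # gets number with the highest concordance or highest value (at most 2)
--     dice = [x for x in dice if x != 1]  # 1 cannot be a 1s target
--     if len(dice) == 0:
--         return [2, 3, 4, 5, 6]
--     counts = get_counts(dice)
--     max_count = max(counts.values())
--     max_val = [key for key, value in counts.items() if value == max_count]
--     return list(set([max(dice), max(max_val)]))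
-- ===== SOURCE B (Python) =====
-- def get_probable_best_ones_targets(dice):
--     # sort-and-scan alternative: descending sort, one run-length pass picks the mode
--     targets = [x for x in dice if x != 1]
--     if not targets:
--         return [2, 3, 4, 5, 6]
--     targets.sort(reverse=True)
--     best = targets[0]
--     prev = None
--     run = 0
--     best_run = 0
--     mode = best
--     for x in targets:
--         if prev == x:
--             run += 1
--         else:
--             prev = x
--             run = 1
--         if run > best_run:
--             best_run = run
--             mode = x
--     return list(set([best, mode]))
-- ===== Notes on version B (the rewrite author's own statement) =====
-- stated objective: alternative
-- what changed: Replaces the counts-dict / max-of-values / modal-key-list pipeline by a descending sort followed by a single run-length scan that tracks the longest run (ties resolved to the larger value by scan order), keeping the same list(set([...])) output step.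
import Mathlib
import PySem

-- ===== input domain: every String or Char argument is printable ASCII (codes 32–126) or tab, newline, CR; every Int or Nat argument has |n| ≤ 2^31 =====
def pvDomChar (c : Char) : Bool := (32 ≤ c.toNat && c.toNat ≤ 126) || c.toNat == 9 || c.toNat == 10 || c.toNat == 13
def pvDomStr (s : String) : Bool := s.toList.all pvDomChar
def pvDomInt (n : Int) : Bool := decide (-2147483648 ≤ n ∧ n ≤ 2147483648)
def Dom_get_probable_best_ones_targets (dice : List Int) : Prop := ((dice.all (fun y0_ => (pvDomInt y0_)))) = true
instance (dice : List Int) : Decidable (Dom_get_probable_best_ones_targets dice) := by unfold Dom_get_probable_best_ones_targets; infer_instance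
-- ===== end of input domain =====

-- B replaces A's counts-dict / max-of-values / modal-key pipeline by a descending sort plus a
-- single run-length scan (an alternative decomposition; no speed claim).

-- ===== PORT A =====
-- shared by both ports: exact model of CPython's list(set([a, b])) for ints with hash(n) = n
-- (except hash(-1) = -2), i.e. |n| < 2^61 — covers all of Dom: table mask 7, probing as in setobject.c,
-- iteration in slot order
def pySetProbe : Nat → Nat → Nat → Nat → Nat
  | 0, i, _, _ => i
  | f+1, i, perturb, occupied =>
    if i = occupied then
      let p := perturb >>> 5
      pySetProbe f ((i * 5 + p + 1) % 8) p occupied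
    else i

def pyListSet2 (a b : Int) : List Int :=
  if a = b then [a]
  else
    let ha : Int := if a = -1 then -2 else a
    let hb : Int := if b = -1 then -2 else b
    let sa := (ha % 8).toNat
    let sb := pySetProbe 32 ((hb % 8).toNat) ((hb % (2 ^ 64 : Int)).toNat) sa
    if sa < sb then [a, b] else [b, a]

def get_counts (dice : List Int) : PySem.Dict Int Int :=
  dice.foldl (fun c d => c.insert d (c.getD d 0 + 1)) PySem.Dict.empty

def get_probable_best_ones_targets (dice : List Int) : List Int :=
  let dice' := dice.filter (fun x => x != 1)
  if dice'.length = 0 then [2, 3, 4, 5, 6]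
  else
    let counts := get_counts dice'
    let max_count := (PySem.List.max? counts.values (fun v => v)).getD 0
    let max_val := (counts.items.filter (fun p => p.2 == max_count)).map (fun p => p.1)
    pyListSet2 ((PySem.List.max? dice' (fun v => v)).getD 0)
               ((PySem.List.max? max_val (fun v => v)).getD 0)

-- ===== PORT B =====
-- one scan step of B's loop body: extend or restart the current run, then update the best run
def bstep (s : Option Int × Int × Int × Int) (x : Int) : Option Int × Int × Int × Int :=
  let s' := if s.1 == some x then (s.1, s.2.1 + 1, s.2.2.1, s.2.2.2)
            else (some x, (1 : Int), s.2.2.1, s.2.2.2)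
  if s'.2.1 > s'.2.2.1 then (s'.1, s'.2.1, s'.2.1, x) else s'

def get_probable_best_ones_targets_alt (dice : List Int) : List Int :=
  let targets := dice.filter (fun x => x != 1)
  if targets.isEmpty then [2, 3, 4, 5, 6]
  else
    let t := PySem.List.sorted targets (fun x => x) true
    let best := t.headD 0
    let r := t.foldl bstep ((none : Option Int), (0 : Int), (0 : Int), best)
    pyListSet2 best r.2.2.2

-- ===== PRECONDITION & SPEC =====
def Spec_get_probable_best_ones_targets (dice : List Int) (out : List Int) : Prop := out = get_probable_best_ones_targets_alt dice
instance (dice : List Int) (out : List Int) : Decidable (Spec_get_probable_best_ones_targets dice out) := by unfold Spec_get_probable_best_ones_targets; infer_instance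

-- ===== CLAIM (what is proved, stated in full; the proofs are below) =====
def Claim_equal_get_probable_best_ones_targets : Prop := ∀ (dice : List Int), Dom_get_probable_best_ones_targets dice → Spec_get_probable_best_ones_targets dice (get_probable_best_ones_targets dice)

-- ===== LEMMAS AND PROOFS =====

-- the invariant of B's run-length scan over a descending-sorted nonempty list: the accumulator holds
-- the last element, its run length, and the (count, value)-maximal mode seen so far
lemma scan_spec (t : List Int) (hs : t.Pairwise (fun a b => b ≤ a)) (hne : t ≠ []) (m0 : Int) :
    ∃ last mode,
      t.getLast? = some last ∧
      mode ∈ t ∧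
      t.foldl bstep ((none : Option Int), (0 : Int), (0 : Int), m0)
        = (some last, (t.count last : Int), (t.count mode : Int), mode) ∧
      (∀ u ∈ t, t.count u ≤ t.count mode) ∧
      (∀ u ∈ t, t.count u = t.count mode → u ≤ mode) := by
  induction t using List.reverseRecOn with
  | nil => exact absurd rfl hne
  | append_singleton t x ih =>
    rw [List.pairwise_append] at hs
    obtain ⟨hst, -, hxle'⟩ := hs
    have hxle : ∀ a ∈ t, x ≤ a := fun a ha => hxle' a ha x (List.mem_singleton_self x)
    by_cases ht : t = []
    · subst ht
      refine ⟨x, x, ?_, ?_, ?_, ?_, ?_⟩ <;> simp [bstep]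
    · obtain ⟨last, mode, hlast, hmem, hfold, hmax, htie⟩ := ih hst ht
      have hlastmem : last ∈ t := List.mem_of_getLast? hlast
      obtain ⟨t', ht'⟩ := List.getLast?_eq_some_iff.mp hlast
      have hmin : ∀ u ∈ t, last ≤ u := by
        intro u hu
        rw [ht'] at hu hst
        rw [List.pairwise_append] at hst
        rcases List.mem_append.mp hu with h | h
        · exact hst.2.2 u h last (List.mem_singleton_self last)
        · rw [List.mem_singleton.mp h]
      have hglast : (t ++ [x]).getLast? = some x := by simp
      have hcnt : ∀ u : Int, (t ++ [x]).count u = t.count u + if u = x then 1 else 0 := by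
        intro u
        rcases eq_or_ne u x with h | h
        · simp [List.count_append, h]
        · simp [List.count_append, h, Ne.symm h]
      have hfold' : (t ++ [x]).foldl bstep ((none : Option Int), (0 : Int), (0 : Int), m0)
          = bstep (some last, (t.count last : Int), (t.count mode : Int), mode) x := by
        rw [List.foldl_append, hfold]; rfl
      by_cases hx : x = last
      · subst hx
        by_cases hgt : ((t.count x : Int) + 1 > (t.count mode : Int))
        · -- new longest run: mode becomes x
          have hle : t.count mode ≤ t.count x := by exact_mod_cast Int.lt_add_one_iff.mp hgt
          refine ⟨x, x, hglast, by simp, ?_, ?_, ?_⟩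
          · rw [hfold']
            have hc : (t ++ [x]).count x = t.count x + 1 := by rw [hcnt]; simp
            simp only [bstep, beq_self_eq_true, if_true, hc]
            rw [if_pos (by exact_mod_cast hgt)]
            push_cast; ring_nf
          · intro u hu
            rw [hcnt, hcnt]
            rcases List.mem_append.mp hu with h | h
            · by_cases hux : u = x
              · subst hux; simp
              · have := hmax u h; simp [hux]; omega
            · rw [List.mem_singleton.mp h]
          · intro u hu hcu
            by_cases hux : u = x
            · rw [hux]
            · exfalso
              rcases List.mem_append.mp hu with h | h
              · have h1 := hmax u h
                rw [hcnt, hcnt] at hcu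
                simp [hux] at hcu
                omega
              · exact hux (List.mem_singleton.mp h)
        · -- run of x does not beat the best: keep mode
          have hle : t.count x + 1 ≤ t.count mode := by
            have := not_lt.mp hgt; exact_mod_cast this
          have hmodene : mode ≠ x := by
            intro h; rw [h] at hle; omega
          have h2 : (t ++ [x]).count mode = t.count mode := by rw [hcnt]; simp [hmodene]
          have h1 : (t ++ [x]).count x = t.count x + 1 := by rw [hcnt]; simp
          refine ⟨x, mode, hglast, List.mem_append_left _ hmem, ?_, ?_, ?_⟩
          · rw [hfold']
            simp only [bstep, beq_self_eq_true, if_true, h1, h2]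
            rw [if_neg (by exact_mod_cast hgt)]
            push_cast; ring_nf
          · intro u hu
            rw [h2, hcnt]
            rcases List.mem_append.mp hu with h | h
            · by_cases hux : u = x
              · subst hux; simp; omega
              · have := hmax u h; simp [hux]; omega
            · rw [List.mem_singleton.mp h]; simp; omega
          · intro u hu hcu
            rw [h2] at hcu
            by_cases hux : u = x
            · subst hux
              exact hmin mode hmem
            · rcases List.mem_append.mp hu with h | h
              · rw [hcnt] at hcu; simp [hux] at hcu
                exact htie u h hcu
              · exact absurd (List.mem_singleton.mp h) hux
      · -- x is a new, strictly smaller value: its run is 1 and cannot beat the best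
        have hxt : x ∉ t := fun h => hx (le_antisymm (hxle last hlastmem) (hmin x h))
        have hcx : (t ++ [x]).count x = 1 := by
          rw [hcnt]; simp [List.count_eq_zero.mpr hxt]
        have hmodene : mode ≠ x := fun h => hxt (h ▸ hmem)
        have h2 : (t ++ [x]).count mode = t.count mode := by rw [hcnt]; simp [hmodene]
        have hpos : 0 < t.count mode := List.count_pos_iff.mpr hmem
        refine ⟨x, mode, hglast, List.mem_append_left _ hmem, ?_, ?_, ?_⟩
        · rw [hfold']
          have hbe : ((some last : Option Int) == some x) = false := by
            simp [Ne.symm hx]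
          simp only [bstep, hbe, if_false, Bool.false_eq_true]
          rw [if_neg (by omega)]
          rw [hcx, h2]
          simp
        · intro u hu
          rw [h2, hcnt]
          rcases List.mem_append.mp hu with h | h
          · by_cases hux : u = x
            · exact absurd (hux ▸ h) hxt
            · have := hmax u h; simp [hux]; omega
          · rw [List.mem_singleton.mp h]
            simp [List.count_eq_zero.mpr hxt]; omega
        · intro u hu hcu
          rw [h2] at hcu
          by_cases hux : u = x
          · subst hux
            exact hxle mode hmem
          · rcases List.mem_append.mp hu with h | h
            · rw [hcnt] at hcu; simp [hux] at hcu
              exact htie u h hcu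
            · exact absurd (List.mem_singleton.mp h) hux

lemma filter_map_fst (D : List Int) (f : Int → Int) (mc : Int) :
    ((D.map (fun k => (k, f k))).filter (fun p => p.2 == mc)).map (fun p => p.1)
      = D.filter (fun k => f k == mc) := by
  induction D with
  | nil => rfl
  | cons a D ih =>
    simp only [List.map_cons, List.filter_cons]
    by_cases h : (f a == mc) = true <;> simp [h, ih]

-- A's value and B's value agree on every input (no Dom hypothesis is needed)
lemma ports_agree (dice : List Int) :
    get_probable_best_ones_targets dice = get_probable_best_ones_targets_alt dice := by
  simp only [get_probable_best_ones_targets, get_probable_best_ones_targets_alt]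
  set l := dice.filter (fun x => x != 1) with hl
  by_cases h0 : l = []
  · simp [h0]
  · rw [if_neg (by simp [h0]), if_neg (by simp [h0])]
    set t := PySem.List.sorted l (fun x => x) true with htdef
    have htperm : t.Perm l := PySem.List.sorted_perm l (fun x => x) true
    have htne : t ≠ [] := by
      intro h
      exact h0 ((PySem.List.sorted_eq_nil_iff l (fun x => x) true).mp h)
    have hpw : t.Pairwise (fun a b => b ≤ a) := by
      have := PySem.List.sorted_pairwise_rev (xs := l) (key := fun x : Int => x)
      simpa using this
    obtain ⟨m, ts, hmts⟩ := List.exists_cons_of_ne_nil htne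
    have hub : ∀ y ∈ l, y ≤ m := by
      have := PySem.List.key_head_sorted_rev_ge (xs := l) (key := fun x : Int => x) hmts
      simpa using this
    have hmmem : m ∈ l := htperm.mem_iff.mp (by rw [hmts]; exact List.mem_cons_self)
    obtain ⟨mx, hmx⟩ : ∃ mx, PySem.List.max? l (fun v => v) = some mx := by
      cases h : PySem.List.max? l (fun v => v) with
      | none => exact absurd ((PySem.List.max?_eq_none_iff _ _).mp h) h0
      | some v => exact ⟨v, rfl⟩
    have hmxmem : mx ∈ l := PySem.List.max?_mem hmx
    have harg1 : mx = m := le_antisymm (hub mx hmxmem) (by simpa using PySem.List.max?_isMax hmx m hmmem)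
    -- A side counts
    have hgc : get_counts l = PySem.Dict.counter l := PySem.Dict.foldl_insert_getD_add_one_eq_counter l
    set D := PySem.Set.ofList l with hD
    have hDsub : ∀ k : Int, k ∈ D ↔ k ∈ l := by
      intro k; exact PySem.Set.mem_ofList l k
    have hitems : (get_counts l).items = D.map (fun k => (k, (l.count k : Int))) := by
      rw [hgc, PySem.Dict.items_counter]
    have hvals : (get_counts l).values = D.map (fun k => (l.count k : Int)) := by
      have : (get_counts l).values = (get_counts l).items.map (fun p => p.2) := rfl
      rw [this, hitems, List.map_map]
      rfl
    obtain ⟨mc, hmc⟩ : ∃ mc, PySem.List.max? (get_counts l).values (fun v => v) = some mc := by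
      cases h : PySem.List.max? (get_counts l).values (fun v => v) with
      | none =>
        have := (PySem.List.max?_eq_none_iff _ _).mp h
        rw [hvals] at this
        have hm : m ∈ D := (hDsub m).mpr hmmem
        simp [List.map_eq_nil_iff] at this
        exact absurd ((hDsub m).mpr hmmem) (by simp [this])
      | some v => exact ⟨v, rfl⟩
    have hmc_mem : mc ∈ (get_counts l).values := PySem.List.max?_mem hmc
    have hmc_ub : ∀ k ∈ D, (l.count k : Int) ≤ mc := by
      intro k hk
      have : (l.count k : Int) ∈ (get_counts l).values := by
        rw [hvals]; exact List.mem_map_of_mem hk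
      simpa using PySem.List.max?_isMax hmc _ this
    obtain ⟨k0, hk0D, hk0⟩ : ∃ k0, k0 ∈ D ∧ (l.count k0 : Int) = mc := by
      rw [hvals] at hmc_mem
      obtain ⟨k0, h1, h2⟩ := List.mem_map.mp hmc_mem
      exact ⟨k0, h1, h2⟩
    have hmv : ((get_counts l).items.filter (fun p => p.2 == mc)).map (fun p => p.1)
        = D.filter (fun k => (l.count k : Int) == mc) := by
      rw [hitems, filter_map_fst]
    obtain ⟨am, ham⟩ : ∃ am, PySem.List.max?
        (((get_counts l).items.filter (fun p => p.2 == mc)).map (fun p => p.1)) (fun v => v) = some am := by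
      cases h : PySem.List.max? (((get_counts l).items.filter (fun p => p.2 == mc)).map (fun p => p.1)) (fun v => v) with
      | none =>
        have hnil := (PySem.List.max?_eq_none_iff _ _).mp h
        rw [hmv] at hnil
        have : k0 ∈ D.filter (fun k => (l.count k : Int) == mc) :=
          List.mem_filter.mpr ⟨hk0D, by simp [hk0]⟩
        rw [hnil] at this
        exact absurd this (List.not_mem_nil)
      | some v => exact ⟨v, rfl⟩
    have ham_mem := PySem.List.max?_mem ham
    rw [hmv] at ham_mem
    obtain ⟨hamD, hamc⟩ := List.mem_filter.mp ham_mem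
    have hamc' : (l.count am : Int) = mc := by simpa using hamc
    have ham_ub : ∀ u ∈ D.filter (fun k => (l.count k : Int) == mc), u ≤ am := by
      intro u hu
      have : u ∈ ((get_counts l).items.filter (fun p => p.2 == mc)).map (fun p => p.1) := by
        rw [hmv]; exact hu
      simpa using PySem.List.max?_isMax ham u this
    -- B side scan
    obtain ⟨lastv, mode, hlastv, hmodet, hfold, hmaxs, hties⟩ := scan_spec t hpw htne (t.headD 0)
    have hcnt_eq : ∀ u : Int, t.count u = l.count u := fun u => htperm.count_eq u
    have hmode_l : mode ∈ l := htperm.mem_iff.mp hmodet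
    have ham_l : am ∈ l := (hDsub am).mp hamD
    have ham_t : am ∈ t := htperm.mem_iff.mpr ham_l
    have h1 : l.count mode ≤ l.count am := by
      have := hmc_ub mode ((hDsub mode).mpr hmode_l)
      rw [← hamc'] at this
      exact_mod_cast this
    have h2 : l.count am ≤ l.count mode := by
      have := hmaxs am ham_t
      rwa [hcnt_eq, hcnt_eq] at this
    have harg2 : am = mode := by
      refine le_antisymm ?_ ?_
      · exact hties am ham_t (by rw [hcnt_eq, hcnt_eq]; omega)
      · refine ham_ub mode (List.mem_filter.mpr ⟨(hDsub mode).mpr hmode_l, ?_⟩)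
        have hceq : l.count mode = l.count am := le_antisymm h1 h2
        have : (l.count mode : Int) = mc := by rw [← hamc', hceq]
        simp [this]
    -- assemble
    rw [hmx, hmc]
    simp only [Option.getD_some]
    rw [ham, hfold]
    simp only [Option.getD_some]
    rw [harg1, harg2, hmts]
    rfl

-- ===== VERDICT (by name: the statement is the Claim_ definition above) =====
theorem get_probable_best_ones_targets_spec : Claim_equal_get_probable_best_ones_targets := by
  intro dice _
  exact ports_agree dice
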